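-- pv_equiv track=rewrite | github.com/Hekkipekki/Guild-Bot---Live | logic/embed/summary_helpers.py | count_signed_melee_and_ranged
-- ===== SOURCE A (Python) =====
-- def count_signed_melee_and_ranged(users: dict) -> tuple[int, int]:
--     melee_count = sum(
--         1
--         for _, info in users.items()
--         if info.get("status") == "sign" and info.get("role") == "Melee"
--     )
--     ranged_count = sum(
--         1
--         for _, info in users.items()
--         if info.get("status") == "sign" and info.get("role") == "Ranged"
--     )
--
--     return melee_count, ranged_count
-- ===== SOURCE B (Python) =====
-- def count_signed_melee_and_ranged(users: dict) -> tuple[int, int]: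
--     by_role = {}
--     for info in users.values():
--         if info.get("status") == "sign":
--             role = info.get("role")
--             by_role[role] = by_role.get(role, 0) + 1
--     return by_role.get("Melee", 0), by_role.get("Ranged", 0)
-- ===== Notes on version B (the rewrite author's own statement) =====
-- stated objective: alternative
-- what changed: Instead of A's two filtered counting passes over users.items(), B builds a role-keyed frequency dictionary of signed users in one pass and then reads the 'Melee' and 'Ranged' entries from it.
import Mathlib
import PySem

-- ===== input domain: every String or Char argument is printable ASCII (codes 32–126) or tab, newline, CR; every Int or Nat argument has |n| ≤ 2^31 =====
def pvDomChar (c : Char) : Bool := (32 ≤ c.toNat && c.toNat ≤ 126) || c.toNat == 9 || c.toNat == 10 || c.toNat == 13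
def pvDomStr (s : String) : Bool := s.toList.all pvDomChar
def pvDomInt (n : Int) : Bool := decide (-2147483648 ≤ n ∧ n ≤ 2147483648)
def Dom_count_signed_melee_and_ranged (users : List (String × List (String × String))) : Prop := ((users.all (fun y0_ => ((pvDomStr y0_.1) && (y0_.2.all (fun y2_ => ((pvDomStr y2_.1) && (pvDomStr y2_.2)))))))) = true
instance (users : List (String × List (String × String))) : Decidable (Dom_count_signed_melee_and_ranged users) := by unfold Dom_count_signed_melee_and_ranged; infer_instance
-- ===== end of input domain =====

-- B replaces A's two filtered counting passes with a role-keyed counter dictionary built once and read twice (objective: alternative).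


-- ===== PORT A =====
-- info.get(k) : first-match lookup in the association list (dict convention)
def pvGetA (info : List (String × String)) (k : String) : Option String :=
  (PySem.Dict.mk info).get? k

def count_signed_melee_and_ranged (users : List (String × List (String × String))) : Int × Int :=
  let melee_count :=
    ((users.filter (fun p => pvGetA p.2 "status" == some "sign" && pvGetA p.2 "role" == some "Melee")).map
      (fun _ => (1 : Int))).sum
  let ranged_count :=
    ((users.filter (fun p => pvGetA p.2 "status" == some "sign" && pvGetA p.2 "role" == some "Ranged")).map
      (fun _ => (1 : Int))).sum
  (melee_count, ranged_count)

-- ===== PORT B =====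
def pvGetB (info : List (String × String)) (k : String) : Option String :=
  (PySem.Dict.mk info).get? k

-- by_role[role] = by_role.get(role, 0) + 1  ==  modify role 0 (+1)
def count_signed_melee_and_ranged_alt (users : List (String × List (String × String))) : Int × Int :=
  let by_role :=
    users.foldl
      (fun (d : PySem.Dict (Option String) Int) p =>
        if pvGetB p.2 "status" == some "sign" then
          d.modify (pvGetB p.2 "role") 0 (· + 1)
        else d)
      PySem.Dict.empty
  (by_role.getD (some "Melee") 0, by_role.getD (some "Ranged") 0)

-- ===== PRECONDITION & SPEC =====
def Spec_count_signed_melee_and_ranged (users : List (String × List (String × String))) (out : Int × Int) : Prop := out = count_signed_melee_and_ranged_alt users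
instance (users : List (String × List (String × String))) (out : Int × Int) : Decidable (Spec_count_signed_melee_and_ranged users out) := by unfold Spec_count_signed_melee_and_ranged; infer_instance

-- ===== CLAIM =====
def Claim_equal_count_signed_melee_and_ranged : Prop := ∀ (users : List (String × List (String × String))), Dom_count_signed_melee_and_ranged users → Spec_count_signed_melee_and_ranged users (count_signed_melee_and_ranged users)

-- ===== LEMMAS AND PROOFS =====
-- A-style count of signed users with a given role key
def pvCnt (users : List (String × List (String × String))) (k : Option String) : Int :=
  ((users.filter (fun p => pvGetA p.2 "status" == some "sign" && pvGetA p.2 "role" == k)).map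
    (fun _ => (1 : Int))).sum

theorem pvCnt_cons (p : String × List (String × String)) (rest : List (String × List (String × String))) (k : Option String) :
    pvCnt (p :: rest) k =
      (if pvGetA p.2 "status" == some "sign" && pvGetA p.2 "role" == k then 1 else 0) + pvCnt rest k := by
  simp only [pvCnt, List.filter_cons]
  split_ifs with h <;> simp_all

theorem counter_getD (users : List (String × List (String × String)))
    (d : PySem.Dict (Option String) Int) (k : Option String) :
    (users.foldl
      (fun (d : PySem.Dict (Option String) Int) p =>
        if pvGetB p.2 "status" == some "sign" then
          d.modify (pvGetB p.2 "role") 0 (· + 1)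
        else d)
      d).getD k 0 = d.getD k 0 + pvCnt users k := by
  induction users generalizing d with
  | nil => simp [pvCnt]
  | cons p rest ih =>
    simp only [List.foldl_cons]
    rw [pvCnt_cons]
    by_cases hs : pvGetB p.2 "status" == some "sign"
    · rw [if_pos hs, ih, PySem.Dict.getD_modify]
      have hs' : (pvGetA p.2 "status" == some "sign") = true := hs
      by_cases hk : k = pvGetB p.2 "role"
      · have hr : (pvGetA p.2 "role" == k) = true := by
          simp [pvGetA, pvGetB, hk]
        subst hk
        simp only [hs', hr, Bool.true_and, if_true]
        ring
      · have hr : (pvGetA p.2 "role" == k) = false := by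
          simp only [pvGetA, pvGetB] at *
          simpa [beq_eq_false_iff_ne] using fun h => hk h.symm
        rw [if_neg hk]
        simp only [hs', hr, Bool.true_and, Bool.false_eq_true, if_false]
        ring
    · rw [if_neg hs, ih]
      have hs' : (pvGetA p.2 "status" == some "sign") = false := by simpa using hs
      simp [hs']

-- ===== VERDICT =====
theorem count_signed_melee_and_ranged_spec : Claim_equal_count_signed_melee_and_ranged := by
  intro users _
  unfold Spec_count_signed_melee_and_ranged
  simp only [count_signed_melee_and_ranged, count_signed_melee_and_ranged_alt, counter_getD]
  simp [pvCnt]
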